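-- pv_equiv track=rewrite | github.com/robin-na/PGG-finetuning | Macro_simulation_eval/utils.py | make_unique_avatar_map
-- ===== SOURCE A (Python) =====
-- from typing import Any, Dict, Mapping, Optional, Sequence
--
-- def normalize_avatar(name: Any) -> str:
--     if name is None:
--         return ""
--     return str(name).strip().upper()
--
-- def make_unique_avatar_map(
--     player_ids: Sequence[str],
--     raw_avatar_by_player: Mapping[str, Any],
-- ) -> Dict[str, str]:
--     out: Dict[str, str] = {}
--     used: Dict[str, str] = {}
--     for i, pid in enumerate(player_ids, start=1):
--         base = normalize_avatar(raw_avatar_by_player.get(pid))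
--         if not base:
--             base = f"PLAYER_{i}"
--         avatar = base
--         k = 2
--         while avatar in used and used[avatar] != pid:
--             avatar = f"{base}_{k}"
--             k += 1
--         out[pid] = avatar
--         used[avatar] = pid
--     return out
-- ===== SOURCE B (Python) =====
-- def normalize_avatar(name):
--     if name is None:
--         return ""
--     return str(name).strip().upper()
--
-- def make_unique_avatar_map(player_ids, raw_avatar_by_player):
--     out = {}
--     taken = set()          # every avatar handed out so far
--     next_k = {}            # base -> next suffix worth trying (never rewinds)
--     own = {}               # (pid, base) -> avatar this pid already got for this base
--     for i, pid in enumerate(player_ids, start=1):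
--         base = normalize_avatar(raw_avatar_by_player.get(pid))
--         if not base:
--             base = f"PLAYER_{i}"
--         if (pid, base) in own:
--             avatar = own[(pid, base)]
--         elif base not in taken:
--             avatar = base
--         else:
--             k = next_k.get(base, 2)
--             while f"{base}_{k}" in taken:
--                 k += 1
--             avatar = f"{base}_{k}"
--             next_k[base] = k + 1
--         out[pid] = avatar
--         taken.add(avatar)
--         own[(pid, base)] = avatar
--     return out
-- ===== Notes on version B (the rewrite author's own statement) =====
-- stated objective: alternative
-- what changed: Instead of restarting the suffix search at k=2 for every player (re-probing all taken suffixes of a base each time) with ownership tests against an avatar->pid dict, B keeps a per-base monotone next-suffix counter, a set of taken avatars, and a (pid, base) memo that resolves the repeated-id reuse case directly, so no taken suffix of a base is ever probed twice.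
import Mathlib
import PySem

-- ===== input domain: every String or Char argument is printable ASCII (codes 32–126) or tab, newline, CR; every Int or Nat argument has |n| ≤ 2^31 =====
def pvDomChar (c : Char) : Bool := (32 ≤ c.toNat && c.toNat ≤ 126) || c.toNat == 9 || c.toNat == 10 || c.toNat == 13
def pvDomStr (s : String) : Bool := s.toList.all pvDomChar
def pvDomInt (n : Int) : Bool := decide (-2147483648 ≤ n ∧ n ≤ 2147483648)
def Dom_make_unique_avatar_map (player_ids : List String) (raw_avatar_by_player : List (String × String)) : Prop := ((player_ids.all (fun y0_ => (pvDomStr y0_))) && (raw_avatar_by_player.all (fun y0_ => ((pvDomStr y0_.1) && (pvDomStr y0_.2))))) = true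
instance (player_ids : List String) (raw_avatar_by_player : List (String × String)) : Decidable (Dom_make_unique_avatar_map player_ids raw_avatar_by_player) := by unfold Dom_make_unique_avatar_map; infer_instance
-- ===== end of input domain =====

-- B replaces A's restart-from-2 suffix probing by a per-base monotone next-suffix counter,
-- a set of taken avatars, and a (pid, base) memo for the repeated-id reuse case, so no
-- taken suffix of a base is ever probed twice.

-- shared helpers (the module helper / f-strings both Pythons use)
def normalize_avatar (name : Option String) : String :=
  match name with
  | none => ""
  | some s => PySem.Str.upper (PySem.Str.strip s)

-- f"{base}_{k}"
def pvSuffixed (base : String) (k : Int) : String :=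
  PySem.Str.join "" [base, "_", PySem.Int.toStr k]

-- f"PLAYER_{i}"
def pvPlayerName (i : Int) : String :=
  PySem.Str.join "" ["PLAYER_", PySem.Int.toStr i]

-- ===== PORT A =====
-- while avatar in used and used[avatar] != pid: avatar = f"{base}_{k}"; k += 1
-- (fuel guard only: the loop always ends within used.size+1 tests)
def pvScanA (used : PySem.Dict String String) (pid base : String) :
    Nat → String → Int → String
  | 0, avatar, _ => avatar
  | f + 1, avatar, k =>
    match used.get? avatar with
    | none => avatar
    | some owner =>
      if owner ≠ pid then pvScanA used pid base f (pvSuffixed base k) (k + 1) else avatar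

def pvLoopA (raw : PySem.Dict String String) :
    List (Int × String) → PySem.Dict String String → PySem.Dict String String →
    PySem.Dict String String
  | [], out, _ => out
  | (i, pid) :: rest, out, used =>
    let b0 := normalize_avatar (raw.get? pid)
    let base := if b0 = "" then pvPlayerName i else b0
    let avatar := pvScanA used pid base (used.items.length + 1) base 2
    pvLoopA raw rest (out.insert pid avatar) (used.insert avatar pid)

def make_unique_avatar_map (player_ids : List String) (raw_avatar_by_player : List (String × String)) : List (String × String) :=
  (pvLoopA (PySem.Dict.ofList raw_avatar_by_player) (PySem.List.enumerate player_ids 1)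
    PySem.Dict.empty PySem.Dict.empty).items

-- ===== PORT B =====
-- while f"{base}_{k}" in taken: k += 1   (k starts at the stored counter, never rewinds)
def pvScanB (taken : PySem.Set String) (base : String) : Int → Nat → Int
  | k, 0 => k
  | k, f + 1 =>
    if PySem.Set.contains taken (pvSuffixed base k) then pvScanB taken base (k + 1) f else k

def pvLoopB (raw : PySem.Dict String String) :
    List (Int × String) → PySem.Dict String String → PySem.Set String →
    PySem.Dict String Int → PySem.Dict (String × String) String → PySem.Dict String String
  | [], out, _, _, _ => out
  | (i, pid) :: rest, out, taken, nk, own =>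
    let b0 := normalize_avatar (raw.get? pid)
    let base := if b0 = "" then pvPlayerName i else b0
    match own.get? (pid, base) with
    | some avatar =>
      pvLoopB raw rest (out.insert pid avatar) (PySem.Set.add taken avatar) nk
        (own.insert (pid, base) avatar)
    | none =>
      if PySem.Set.contains taken base then
        let k0 := pvScanB taken base (nk.getD base 2) (taken.length + 1)
        let avatar := pvSuffixed base k0
        pvLoopB raw rest (out.insert pid avatar) (PySem.Set.add taken avatar)
          (nk.insert base (k0 + 1)) (own.insert (pid, base) avatar)
      else
        pvLoopB raw rest (out.insert pid base) (PySem.Set.add taken base) nk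
          (own.insert (pid, base) base)

def make_unique_avatar_map_alt (player_ids : List String) (raw_avatar_by_player : List (String × String)) : List (String × String) :=
  (pvLoopB (PySem.Dict.ofList raw_avatar_by_player) (PySem.List.enumerate player_ids 1)
    PySem.Dict.empty PySem.Set.empty PySem.Dict.empty PySem.Dict.empty).items

-- ===== PRECONDITION & SPEC =====
def Spec_make_unique_avatar_map (player_ids : List String) (raw_avatar_by_player : List (String × String)) (out : List (String × String)) : Prop := out = make_unique_avatar_map_alt player_ids raw_avatar_by_player
instance (player_ids : List String) (raw_avatar_by_player : List (String × String)) (out : List (String × String)) : Decidable (Spec_make_unique_avatar_map player_ids raw_avatar_by_player out) := by unfold Spec_make_unique_avatar_map; infer_instance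

-- ===== CLAIM (what is proved, stated in full; the proofs are below) =====
def Claim_equal_make_unique_avatar_map : Prop := ∀ (player_ids : List String) (raw_avatar_by_player : List (String × String)), Dom_make_unique_avatar_map player_ids raw_avatar_by_player → Spec_make_unique_avatar_map player_ids raw_avatar_by_player (make_unique_avatar_map player_ids raw_avatar_by_player)

-- ===== LEMMAS AND PROOFS =====

-- decimal decoding: str(n) is injective on the naturals
def pvDecode (l : List Char) : Nat := l.foldl (fun a c => 10 * a + (c.toNat - 48)) 0

-- the family of avatars the suffix loop for `b` can produce
def pvInFam (b a : String) : Prop := a = b ∨ ∃ k : Int, 2 ≤ k ∧ a = pvSuffixed b k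

-- A's while-loop exit condition
def pvStopA (used : PySem.Dict String String) (pid c : String) : Prop :=
  used.get? c = none ∨ used.get? c = some pid

-- the shapes a base string recorded for player p can have (rem = the not-yet-processed rows)
def pvShape (raw : PySem.Dict String String) (rem : List (Int × String)) (p b : String) : Prop :=
  (normalize_avatar (raw.get? p) ≠ "" ∧ b = normalize_avatar (raw.get? p)) ∨
  (normalize_avatar (raw.get? p) = "" ∧
    ∃ i' : Int, 1 ≤ i' ∧ (∀ pr ∈ rem, i' < pr.1) ∧ b = pvPlayerName i')

theorem pvDigitChar_toNat {n : Nat} (h : n < 10) : (Nat.digitChar n).toNat - 48 = n := by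
  interval_cases n <;> decide

theorem pvDecode_toDigits (n : Nat) : pvDecode (Nat.toDigits 10 n) = n := by
  induction n using Nat.strong_induction_on with
  | _ n ih =>
    by_cases h : n < 10
    · rw [Nat.toDigits_of_lt_base h]
      simp [pvDecode, pvDigitChar_toNat h]
    · rw [Nat.toDigits_of_base_le (by norm_num) (le_of_not_gt h)]
      have h2 : n % 10 < 10 := Nat.mod_lt _ (by norm_num)
      have h3 := ih (n / 10) (by omega)
      simp only [pvDecode, List.foldl_append] at *
      rw [h3]
      simp only [List.foldl_cons, List.foldl_nil]
      rw [pvDigitChar_toNat h2]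
      omega

theorem pvToChars_inj {j1 j2 : Int} (h1 : 0 ≤ j1) (h2 : 0 ≤ j2)
    (h : PySem.Int.toChars j1 = PySem.Int.toChars j2) : j1 = j2 := by
  simp only [PySem.Int.toChars, if_neg (not_lt.2 h1), if_neg (not_lt.2 h2)] at h
  have := congrArg pvDecode h
  rw [pvDecode_toDigits, pvDecode_toDigits] at this
  omega

theorem pvSuffixed_toList (b : String) (k : Int) :
    (pvSuffixed b k).toList = b.toList ++ '_' :: PySem.Int.toChars k := by
  simp [pvSuffixed, PySem.Str.join, PySem.Chars.join, List.intercalate, String.toList_ofList,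
    PySem.Int.toList_toStr]

theorem pvPlayerName_toList (i : Int) :
    (pvPlayerName i).toList = "PLAYER_".toList ++ PySem.Int.toChars i := by
  simp [pvPlayerName, PySem.Str.join, PySem.Chars.join, List.intercalate, String.toList_ofList,
    PySem.Int.toList_toStr]

theorem pvSuffixed_inj {b : String} {j1 j2 : Int} (h1 : 0 ≤ j1) (h2 : 0 ≤ j2)
    (h : pvSuffixed b j1 = pvSuffixed b j2) : j1 = j2 := by
  have := congrArg String.toList h
  rw [pvSuffixed_toList, pvSuffixed_toList] at this
  exact pvToChars_inj h1 h2 (by simpa using this)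

theorem pvSuffixed_ne_base (b : String) (k : Int) : pvSuffixed b k ≠ b := by
  intro h
  have := congrArg (fun s => s.toList.length) h
  simp only [pvSuffixed_toList, List.length_append, List.length_cons] at this
  omega

theorem pvUnd_not_mem_toChars {i : Int} (h : 0 ≤ i) : '_' ∉ PySem.Int.toChars i := by
  simp only [PySem.Int.toChars, if_neg (not_lt.2 h)]
  intro hm
  have := Nat.isDigit_of_mem_toDigits (by norm_num) (by norm_num) hm
  exact absurd this (by decide)

theorem pvSplitUnd : ∀ (a1 b1 a2 b2 : List Char), '_' ∉ a1 → '_' ∉ a2 →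
    a1 ++ '_' :: b1 = a2 ++ '_' :: b2 → a1 = a2 ∧ b1 = b2 := by
  intro a1
  induction a1 with
  | nil =>
    intro b1 a2 b2 _ h2 h
    cases a2 with
    | nil => simpa using h
    | cons x xs =>
      simp only [List.nil_append, List.cons_append, List.cons.injEq] at h
      obtain ⟨hx, -⟩ := h
      subst hx
      exact absurd List.mem_cons_self h2
  | cons y ys ih =>
    intro b1 a2 b2 h1 h2 h
    cases a2 with
    | nil =>
      simp only [List.cons_append, List.nil_append, List.cons.injEq] at h
      obtain ⟨hy, -⟩ := h
      subst hy
      exact absurd List.mem_cons_self h1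
    | cons x xs =>
      simp only [List.cons_append, List.cons.injEq] at h
      obtain ⟨rfl, h⟩ := h
      obtain ⟨rfl, rfl⟩ := ih b1 xs b2 (fun hm => h1 (List.mem_cons_of_mem _ hm))
        (fun hm => h2 (List.mem_cons_of_mem _ hm)) h
      exact ⟨rfl, rfl⟩

theorem pvFamPlayer_disjoint {i1 i2 : Int} (h1 : 0 ≤ i1) (h2 : 0 ≤ i2) (hne : i1 ≠ i2)
    {c : String} (hf1 : pvInFam (pvPlayerName i1) c) (hf2 : pvInFam (pvPlayerName i2) c) :
    False := by
  have hbb : ∀ {a b : Int}, 0 ≤ a → 0 ≤ b → pvPlayerName a = pvPlayerName b → a = b := by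
    intro a b ha hb h
    have := congrArg String.toList h
    rw [pvPlayerName_toList, pvPlayerName_toList] at this
    exact pvToChars_inj ha hb (List.append_cancel_left this)
  have hbs : ∀ {a b k : Int}, 0 ≤ a → 0 ≤ b →
      pvPlayerName a = pvSuffixed (pvPlayerName b) k → False := by
    intro a b k ha hb h
    have := congrArg String.toList h
    rw [pvPlayerName_toList, pvSuffixed_toList, pvPlayerName_toList, List.append_assoc] at this
    have hmem : '_' ∈ PySem.Int.toChars a := by
      rw [List.append_cancel_left this]
      exact List.mem_append_right _ List.mem_cons_self
    exact pvUnd_not_mem_toChars ha hmem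
  rcases hf1 with rfl | ⟨k1, hk1, rfl⟩
  · rcases hf2 with heq | ⟨k2, hk2, heq⟩
    · exact hne (hbb h1 h2 heq)
    · exact hbs h1 h2 heq
  · rcases hf2 with heq | ⟨k2, hk2, heq⟩
    · exact hbs h2 h1 heq.symm
    · have := congrArg String.toList heq
      rw [pvSuffixed_toList, pvSuffixed_toList, pvPlayerName_toList, pvPlayerName_toList,
        List.append_assoc, List.append_assoc] at this
      have hsp := pvSplitUnd _ _ _ _ (pvUnd_not_mem_toChars h1) (pvUnd_not_mem_toChars h2)
        (List.append_cancel_left this)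
      exact hne (pvToChars_inj h1 h2 hsp.1)

-- pigeonhole: some suffix in the next |S|+1 candidates is unused
theorem pvPH (S : List String) (_hnd : S.Nodup) (b : String) (k : Int) (hk : 0 ≤ k) :
    ∃ t : Nat, t ≤ S.length ∧ pvSuffixed b (k + t) ∉ S := by
  by_contra hcon
  push_neg at hcon
  have hsub : ((List.range (S.length + 1)).map (fun t : Nat => pvSuffixed b (k + (t : Int)))) ⊆ S := by
    intro x hx
    simp only [List.mem_map] at hx
    obtain ⟨t, ht, rfl⟩ := hx
    simp only [List.mem_range] at ht
    exact hcon t (by omega)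
  have hinj : Function.Injective (fun t : Nat => pvSuffixed b (k + (t : Int))) := by
    intro t1 t2 h
    have := pvSuffixed_inj (b := b) (by omega) (by omega) h
    omega
  have hnd2 := (List.nodup_range (n := S.length + 1)).map hinj
  have := (List.subperm_of_subset hnd2 hsub).length_le
  simp at this

theorem pvPH2 (S : List String) (_hnd : S.Nodup) (b : String) (hb : b ∈ S) :
    ∃ t : Nat, t < S.length ∧ pvSuffixed b (2 + t) ∉ S := by
  by_contra hcon
  push_neg at hcon
  have hsub : (b :: (List.range S.length).map (fun t : Nat => pvSuffixed b (2 + (t : Int)))) ⊆ S := by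
    intro x hx
    rcases List.mem_cons.1 hx with rfl | hx
    · exact hb
    · simp only [List.mem_map] at hx
      obtain ⟨t, ht, rfl⟩ := hx
      simp only [List.mem_range] at ht
      exact hcon t ht
  have hinj : Function.Injective (fun t : Nat => pvSuffixed b (2 + (t : Int))) := by
    intro t1 t2 h
    have := pvSuffixed_inj (b := b) (by omega) (by omega) h
    omega
  have hnd2 : (b :: (List.range S.length).map (fun t : Nat => pvSuffixed b (2 + (t : Int)))).Nodup := by
    refine List.nodup_cons.2 ⟨?_, (List.nodup_range).map hinj⟩
    simp only [List.mem_map]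
    rintro ⟨t, -, h⟩
    exact pvSuffixed_ne_base b (2 + t) h
  have := (List.subperm_of_subset hnd2 hsub).length_le
  simp at this

-- counting: if b and all suffixes 2..ka are taken, then ka ≤ |S|
theorem pvCount (S : List String) (_hnd : S.Nodup) (b : String) (hb : b ∈ S) (ka : Int)
    (h2 : 2 ≤ ka) (hin : ∀ j : Int, 2 ≤ j → j ≤ ka → pvSuffixed b j ∈ S) : ka ≤ S.length := by
  have hsub : (b :: (List.range (ka - 1).toNat).map (fun t : Nat => pvSuffixed b (2 + (t : Int)))) ⊆ S := by
    intro x hx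
    rcases List.mem_cons.1 hx with rfl | hx
    · exact hb
    · simp only [List.mem_map] at hx
      obtain ⟨t, ht, rfl⟩ := hx
      simp only [List.mem_range] at ht
      exact hin (2 + t) (by omega) (by omega)
  have hinj : Function.Injective (fun t : Nat => pvSuffixed b (2 + (t : Int))) := by
    intro t1 t2 h
    have := pvSuffixed_inj (b := b) (by omega) (by omega) h
    omega
  have hnd2 : (b :: (List.range (ka - 1).toNat).map (fun t : Nat => pvSuffixed b (2 + (t : Int)))).Nodup := by
    refine List.nodup_cons.2 ⟨?_, (List.nodup_range).map hinj⟩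
    simp only [List.mem_map]
    rintro ⟨t, -, h⟩
    exact pvSuffixed_ne_base b (2 + t) h
  have := (List.subperm_of_subset hnd2 hsub).length_le
  simp only [List.length_cons, List.length_map, List.length_range] at this
  omega

-- pvScanB returns the first free suffix index ≥ its start, given some free one within fuel
theorem pvScanB_spec (S : PySem.Set String) (b : String) :
    ∀ (f : Nat) (k : Int),
      (∃ t : Nat, t < f ∧ PySem.Set.contains S (pvSuffixed b (k + t)) = false) →
      PySem.Set.contains S (pvSuffixed b (pvScanB S b k f)) = false ∧
      k ≤ pvScanB S b k f ∧
      ∀ j : Int, k ≤ j → j < pvScanB S b k f → PySem.Set.contains S (pvSuffixed b j) = true := by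
  intro f
  induction f with
  | zero => rintro k ⟨t, ht, -⟩; omega
  | succ f ih =>
    rintro k ⟨t, ht, hfree⟩
    by_cases hc : PySem.Set.contains S (pvSuffixed b k) = true
    · have ht0 : t ≠ 0 := by
        rintro rfl; simp only [Int.natCast_zero, add_zero] at hfree; rw [hc] at hfree; cases hfree
      have hex : ∃ t' : Nat, t' < f ∧ PySem.Set.contains S (pvSuffixed b (k + 1 + t')) = false := by
        refine ⟨t - 1, by omega, ?_⟩
        have : k + 1 + ((t - 1 : Nat) : Int) = k + t := by omega
        rw [this]; exact hfree
      obtain ⟨h1, h2, h3⟩ := ih (k + 1) hex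
      have hstep : pvScanB S b k (f + 1) = pvScanB S b (k + 1) f := by
        simp only [pvScanB]; rw [if_pos hc]
      rw [hstep]
      refine ⟨h1, by omega, fun j hj1 hj2 => ?_⟩
      rcases eq_or_lt_of_le hj1 with rfl | hlt
      · exact hc
      · exact h3 j (by omega) hj2
    · have hstep : pvScanB S b k (f + 1) = k := by
        simp only [pvScanB]; rw [if_neg hc]
      rw [hstep]
      exact ⟨by simpa using hc, le_refl _, fun j hj1 hj2 => by omega⟩

theorem pvMem_keys_iff (used : PySem.Dict String String) (x : String) :
    x ∈ used.keys ↔ ∃ o, used.get? x = some o := by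
  rw [← PySem.Dict.contains_iff_mem_keys, PySem.Dict.contains_eq_isSome_get?]
  exact Option.isSome_iff_exists

-- A's while loop stops at the first index whose avatar is free or already owned by pid
theorem pvScanA_spec (used : PySem.Dict String String) (pid b : String) :
    ∀ (f : Nat) (j : Int),
      (∃ t : Nat, t < f ∧ pvStopA used pid (pvSuffixed b (j + t))) →
      ∃ r : Int, pvScanA used pid b f (pvSuffixed b j) (j + 1) = pvSuffixed b r ∧ j ≤ r ∧
        pvStopA used pid (pvSuffixed b r) ∧
        ∀ m : Int, j ≤ m → m < r → ¬ pvStopA used pid (pvSuffixed b m) := by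
  intro f
  induction f with
  | zero => rintro j ⟨t, ht, -⟩; omega
  | succ f ih =>
    rintro j ⟨t, ht, hstop⟩
    cases hget : used.get? (pvSuffixed b j) with
    | none =>
      refine ⟨j, by simp [pvScanA, hget], le_refl _, Or.inl hget, fun m h1 h2 => by omega⟩
    | some o =>
      by_cases ho : o = pid
      · subst ho
        refine ⟨j, ?_, le_refl _, Or.inr hget, fun m h1 h2 => by omega⟩
        simp [pvScanA, hget]
      · have ht0 : t ≠ 0 := by
          rintro rfl
          simp only [Int.natCast_zero, add_zero] at hstop
          rcases hstop with h | h
          · rw [hget] at h; cases h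
          · rw [hget] at h; exact ho (Option.some.inj h)
        have hex : ∃ t' : Nat, t' < f ∧ pvStopA used pid (pvSuffixed b (j + 1 + t')) := by
          refine ⟨t - 1, by omega, ?_⟩
          have : j + 1 + ((t - 1 : Nat) : Int) = j + t := by omega
          rw [this]; exact hstop
        obtain ⟨r, heq, hge, hst, hmin⟩ := ih (j + 1) hex
        have hstep : pvScanA used pid b (f + 1) (pvSuffixed b j) (j + 1) =
            pvScanA used pid b f (pvSuffixed b (j + 1)) (j + 1 + 1) := by
          simp only [pvScanA, hget]
          rw [if_pos ho]
        refine ⟨r, hstep.trans heq, by omega, hst, fun m h1 h2 => ?_⟩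
        rcases eq_or_lt_of_le h1 with rfl | hlt
        · rintro (h | h)
          · rw [hget] at h; cases h
          · rw [hget] at h; exact ho (Option.some.inj h)
        · exact hmin m (by omega) h2

-- main loop invariant
theorem pvLoop_eq (raw : PySem.Dict String String) :
    ∀ (rem : List (Int × String)) (out used : PySem.Dict String String)
      (nk : PySem.Dict String Int) (own : PySem.Dict (String × String) String),
      rem.Pairwise (fun x y => x.1 < y.1) →
      (∀ pr ∈ rem, 1 ≤ pr.1) →
      used.keys.Nodup →
      (∀ (b : String) (m : Int), nk.get? b = some m →
        2 ≤ m ∧ ∀ j : Int, 2 ≤ j → j < m → pvSuffixed b j ∈ used.keys) →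
      (∀ a p, used.get? a = some p →
        ∃ b', own.get? (p, b') = some a ∧ pvInFam b' a ∧ pvShape raw rem p b') →
      (∀ p b a, own.get? (p, b) = some a → used.get? a = some p ∧
        (a = b ∨ ∃ k : Int, 2 ≤ k ∧ a = pvSuffixed b k ∧ b ∈ used.keys ∧
          ∀ j : Int, 2 ≤ j → j < k → pvSuffixed b j ∈ used.keys)) →
      pvLoopA raw rem out used = pvLoopB raw rem out used.keys nk own := by
  intro rem
  induction rem with
  | nil => intro out used nk own _ _ _ _ _ _; simp [pvLoopA, pvLoopB]
  | cons hd rest ih =>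
    obtain ⟨i, pid⟩ := hd
    intro out used nk own Hpw Hge Hkeys Hnk I4 I5
    have hi1 : (1 : Int) ≤ i := Hge (i, pid) List.mem_cons_self
    have hirest : ∀ pr ∈ rest, i < pr.1 := (List.pairwise_cons.1 Hpw).1
    have Hpw' := (List.pairwise_cons.1 Hpw).2
    have Hge' : ∀ pr ∈ rest, 1 ≤ pr.1 := fun pr h => Hge pr (List.mem_cons_of_mem _ h)
    have hklen : used.keys.length = used.items.length := by simp [PySem.Dict.keys]
    set b0 := normalize_avatar (raw.get? pid) with hb0
    set base := if b0 = "" then pvPlayerName i else b0 with hbase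
    have hshape : pvShape raw rest pid base := by
      by_cases he : b0 = ""
      · exact Or.inr ⟨he, i, hi1, hirest, by rw [hbase, if_pos he]⟩
      · exact Or.inl ⟨he, by rw [hbase, if_neg he]⟩
    have hshape_weak : ∀ p b', pvShape raw ((i, pid) :: rest) p b' → pvShape raw rest p b' := by
      rintro p b' (h | ⟨hz, i', h1, hlt, heq⟩)
      · exact Or.inl h
      · exact Or.inr ⟨hz, i', h1, fun pr hpr => hlt pr (List.mem_cons_of_mem _ hpr), heq⟩
    have hNoOwn : ∀ c, pvInFam base c → used.get? c = some pid →
        own.get? (pid, base) = some c := by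
      intro c hc hgot
      obtain ⟨b', hown, hfam', hsh'⟩ := I4 c pid hgot
      have hb'base : b' = base := by
        rcases hsh' with ⟨hne, rfl⟩ | ⟨hz, i', h1i, hlt, rfl⟩
        · rw [hbase, if_neg hne]
        · exfalso
          have hbaseP : base = pvPlayerName i := by rw [hbase, if_pos hz]
          have hii : i' < i := hlt (i, pid) List.mem_cons_self
          exact pvFamPlayer_disjoint (by omega) (by omega) (by omega) hfam' (hbaseP ▸ hc)
      rw [← hb'base]; exact hown
    cases hownb : own.get? (pid, base) with
    | some a =>
      -- repeated (pid, base): A's scan stops exactly at the memoised avatar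
      obtain ⟨hua, hfamA⟩ := I5 pid base a hownb
      have hfamA' : pvInFam base a := by
        rcases hfamA with h' | ⟨k, h2, he, -, -⟩
        · exact Or.inl h'
        · exact Or.inr ⟨k, h2, he⟩
      have hAeq : pvScanA used pid base (used.items.length + 1) base 2 = a := by
        rcases hfamA with rfl | ⟨ka, hka2, hk_eq, hbmem, hmid⟩
        · simp [pvScanA, hua]
        · subst hk_eq
          obtain ⟨q, hq⟩ := (pvMem_keys_iff used base).1 hbmem
          have hqne : q ≠ pid := by
            rintro rfl
            have h' := hNoOwn base (Or.inl rfl) hq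
            rw [hownb] at h'
            exact pvSuffixed_ne_base base ka (Option.some.inj h')
          have hka_mem : pvSuffixed base ka ∈ used.keys :=
            (pvMem_keys_iff used _).2 ⟨pid, hua⟩
          have hcount : ka ≤ used.keys.length := by
            refine pvCount used.keys Hkeys base hbmem ka hka2 (fun j hj1 hj2 => ?_)
            rcases eq_or_lt_of_le hj2 with rfl | hlt
            · exact hka_mem
            · exact hmid j hj1 hlt
          obtain ⟨r, heq, hge, hst, hmin⟩ := pvScanA_spec used pid base used.items.length 2
            ⟨(ka - 2).toNat, by omega, by
              have h' : (2 : Int) + ((ka - 2).toNat : Int) = ka := by omega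
              rw [h']; exact Or.inr hua⟩
          have hstep : pvScanA used pid base (used.items.length + 1) base 2 =
              pvScanA used pid base used.items.length (pvSuffixed base 2) (2 + 1) := by
            simp only [pvScanA, hq]
            rw [if_pos hqne]
          have hrka : r = ka := by
            rcases lt_trichotomy r ka with hlt | heq' | hlt
            · exfalso
              rcases hst with hnone | hpid
              · obtain ⟨o', ho'⟩ := (pvMem_keys_iff used _).1 (hmid r hge hlt)
                rw [ho'] at hnone; cases hnone
              · have h' := hNoOwn (pvSuffixed base r) (Or.inr ⟨r, hge, rfl⟩) hpid
                rw [hownb] at h'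
                have := pvSuffixed_inj (b := base) (by omega) (by omega) (Option.some.inj h')
                omega
            · exact heq'
            · exact absurd (Or.inr hua) (hmin ka (by omega) hlt)
          rw [hstep, heq, hrka]
      have hamem : a ∈ used.keys := (pvMem_keys_iff used _).2 ⟨pid, hua⟩
      have hacont : used.contains a = true := (PySem.Dict.contains_iff_mem_keys _ _).2 hamem
      have hkeys' : (used.insert a pid).keys = used.keys :=
        PySem.Dict.keys_insert_of_contains used pid hacont
      have hadd : PySem.Set.add used.keys a = used.keys := PySem.Set.add_of_mem hamem
      have hAstep : pvLoopA raw ((i, pid) :: rest) out used =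
          pvLoopA raw rest (out.insert pid a) (used.insert a pid) := by
        simp only [pvLoopA, ← hb0, ← hbase, hAeq]
      have hBstep : pvLoopB raw ((i, pid) :: rest) out used.keys nk own =
          pvLoopB raw rest (out.insert pid a) (PySem.Set.add used.keys a) nk
            (own.insert (pid, base) a) := by
        simp only [pvLoopB, ← hb0, ← hbase, hownb]
      rw [hAstep, hBstep, hadd, ← hkeys']
      refine ih _ _ _ _ Hpw' Hge' (by rw [hkeys']; exact Hkeys) ?_ ?_ ?_
      · intro b m h
        rw [hkeys']
        exact Hnk b m h
      · intro a' p h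
        rw [PySem.Dict.get?_insert] at h
        split at h
        · rename_i hcond
          cases h
          subst hcond
          exact ⟨base, PySem.Dict.get?_insert_self own _ _, hfamA', hshape⟩
        · rename_i hcond
          obtain ⟨b', hown', hf, hsh⟩ := I4 a' p h
          refine ⟨b', ?_, hf, hshape_weak p b' hsh⟩
          rw [PySem.Dict.get?_insert, if_neg ?_]
          · exact hown'
          · intro hkeq
            rw [hkeq, hownb] at hown'
            exact hcond (Option.some.inj hown').symm
      · intro p b a' h
        rw [PySem.Dict.get?_insert] at h
        split at h
        · rename_i hkeq
          cases h
          obtain ⟨rfl, rfl⟩ := Prod.mk.injEq .. ▸ hkeq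
          refine ⟨by rw [PySem.Dict.get?_insert, if_pos rfl], ?_⟩
          rcases hfamA with h' | ⟨ka, h2, heqa, hbm, hmids⟩
          · exact Or.inl h'
          · exact Or.inr ⟨ka, h2, heqa, by rw [hkeys']; exact hbm,
              fun j hj1 hj2 => by rw [hkeys']; exact hmids j hj1 hj2⟩
        · obtain ⟨hu, hrest⟩ := I5 p b a' h
          refine ⟨?_, ?_⟩
          · rw [PySem.Dict.get?_insert]
            split
            · rename_i hcond
              subst hcond
              rw [hua] at hu
              exact hu ▸ rfl
            · exact hu
          · rcases hrest with h' | ⟨k, hk2, heqa, hbm, hmids⟩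
            · exact Or.inl h'
            · exact Or.inr ⟨k, hk2, heqa, by rw [hkeys']; exact hbm,
                fun j hj1 hj2 => by rw [hkeys']; exact hmids j hj1 hj2⟩
    | none =>
      have hNoPid : ∀ c, pvInFam base c → ∀ q, used.get? c = some q → q ≠ pid := by
        intro c hc q hq hqp
        subst hqp
        have h' := hNoOwn c hc hq
        rw [hownb] at h'
        cases h'
      by_cases hcm : base ∈ used.keys
      · -- base taken: both sides scan for the first free suffix
        obtain ⟨q, hq⟩ := (pvMem_keys_iff used base).1 hcm
        have hqne : q ≠ pid := hNoPid base (Or.inl rfl) q hq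
        have hstopfree : ∀ j : Int, 2 ≤ j →
            (pvStopA used pid (pvSuffixed base j) ↔ pvSuffixed base j ∉ used.keys) := by
          intro j hj
          constructor
          · rintro (hnone | hpid)
            · intro hm
              obtain ⟨o', ho'⟩ := (pvMem_keys_iff used _).1 hm
              rw [ho'] at hnone; cases hnone
            · exact absurd rfl (hNoPid _ (Or.inr ⟨j, hj, rfl⟩) pid hpid)
          · intro hnm
            cases hg : used.get? (pvSuffixed base j) with
            | none => exact Or.inl hg
            | some o => exact absurd ((pvMem_keys_iff used _).2 ⟨o, hg⟩) hnm
        obtain ⟨t0, ht0, hnm0⟩ := pvPH2 used.keys Hkeys base hcm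
        obtain ⟨r, heqA, hgeA, hstA, hminA⟩ := pvScanA_spec used pid base used.items.length 2
          ⟨t0, by omega, (hstopfree (2 + t0) (by omega)).2 hnm0⟩
        have hh : 2 ≤ nk.getD base 2 ∧ ∀ j : Int, 2 ≤ j → j < nk.getD base 2 →
            pvSuffixed base j ∈ used.keys := by
          rw [PySem.Dict.getD_eq_get?_getD]
          cases hnkb : nk.get? base with
          | none => exact ⟨by norm_num, fun j h1 h2 => by simp at h2; omega⟩
          | some m => exact Hnk base m hnkb
        obtain ⟨t1, ht1, hnm1⟩ := pvPH used.keys Hkeys base (nk.getD base 2) (by omega)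
        obtain ⟨f1, f2, f3⟩ := pvScanB_spec used.keys base (used.keys.length + 1)
          (nk.getD base 2) ⟨t1, by omega, by
            rw [PySem.Set.contains_eq_decide]; simp [hnm1]⟩
        set r2 := pvScanB used.keys base (nk.getD base 2) (used.keys.length + 1) with hr2
        have hfree2 : pvSuffixed base r2 ∉ used.keys := by
          rw [PySem.Set.contains_eq_decide] at f1
          simpa using f1
        have hmid2 : ∀ j : Int, nk.getD base 2 ≤ j → j < r2 → pvSuffixed base j ∈ used.keys := by
          intro j h1 h2
          have := f3 j h1 h2
          rwa [PySem.Set.contains_iff] at this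
        have hge2' : 2 ≤ r2 := le_trans hh.1 f2
        have hrr2 : r = r2 := by
          have hrh : nk.getD base 2 ≤ r := by
            by_contra hlt
            exact ((hstopfree r hgeA).1 hstA) (hh.2 r hgeA (by omega))
          rcases lt_trichotomy r r2 with hlt | heq' | hlt
          · exact absurd (hmid2 r hrh hlt) ((hstopfree r hgeA).1 hstA)
          · exact heq'
          · exact absurd ((hstopfree r2 hge2').2 hfree2) (hminA r2 hge2' hlt)
        have hstep : pvScanA used pid base (used.items.length + 1) base 2 =
            pvScanA used pid base used.items.length (pvSuffixed base 2) (2 + 1) := by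
          simp only [pvScanA, hq]
          rw [if_pos hqne]
        have hAeq : pvScanA used pid base (used.items.length + 1) base 2 =
            pvSuffixed base r2 := by rw [hstep, heqA, hrr2]
        have hcB : PySem.Set.contains used.keys base = true := (PySem.Set.contains_iff _ _).2 hcm
        have havc : used.contains (pvSuffixed base r2) = false := by
          rw [PySem.Dict.contains_eq_decide_mem_keys]
          simpa using hfree2
        have hkeys' : (used.insert (pvSuffixed base r2) pid).keys =
            used.keys ++ [pvSuffixed base r2] :=
          PySem.Dict.keys_insert_of_not_contains used pid havc
        have hadd : PySem.Set.add used.keys (pvSuffixed base r2) =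
            used.keys ++ [pvSuffixed base r2] := PySem.Set.add_of_not_mem hfree2
        have hmem' : ∀ x, x ∈ used.keys → x ∈ (used.insert (pvSuffixed base r2) pid).keys := by
          intro x hx
          rw [hkeys']
          exact List.mem_append_left _ hx
        have hAstep : pvLoopA raw ((i, pid) :: rest) out used =
            pvLoopA raw rest (out.insert pid (pvSuffixed base r2))
              (used.insert (pvSuffixed base r2) pid) := by
          simp only [pvLoopA, ← hb0, ← hbase, hAeq]
        have hBstep : pvLoopB raw ((i, pid) :: rest) out used.keys nk own =
            pvLoopB raw rest (out.insert pid (pvSuffixed base r2))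
              (PySem.Set.add used.keys (pvSuffixed base r2)) (nk.insert base (r2 + 1))
              (own.insert (pid, base) (pvSuffixed base r2)) := by
          simp only [pvLoopB, ← hb0, ← hbase, hownb, if_pos hcB, ← hr2]
        rw [hAstep, hBstep, hadd, ← hkeys']
        refine ih _ _ _ _ Hpw' Hge' ?_ ?_ ?_ ?_
        · rw [hkeys']
          refine List.Nodup.append Hkeys (List.nodup_singleton _) ?_
          intro x hx hb'
          simp only [List.mem_singleton] at hb'
          subst hb'
          exact hfree2 hx
        · intro b m h
          rw [PySem.Dict.get?_insert] at h
          split at h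
          · rename_i hcond
            cases h
            subst hcond
            refine ⟨by omega, fun j hj1 hj2 => ?_⟩
            rcases lt_or_ge j (nk.getD base 2) with hlt | hge
            · exact hmem' _ (hh.2 j hj1 hlt)
            · rcases lt_or_ge j r2 with hlt2 | hge2
              · exact hmem' _ (hmid2 j hge hlt2)
              · have hjr : j = r2 := by omega
                subst hjr
                rw [hkeys']
                exact List.mem_append_right _ (List.mem_singleton_self _)
          · obtain ⟨hm2, hcov⟩ := Hnk b m h
            exact ⟨hm2, fun j h1 h2 => hmem' _ (hcov j h1 h2)⟩
        · intro a' p h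
          rw [PySem.Dict.get?_insert] at h
          split at h
          · rename_i hcond
            cases h
            subst hcond
            exact ⟨base, PySem.Dict.get?_insert_self own _ _,
              Or.inr ⟨r2, hge2', rfl⟩, hshape⟩
          · rename_i hcond
            obtain ⟨b', hown', hf, hsh⟩ := I4 a' p h
            refine ⟨b', ?_, hf, hshape_weak p b' hsh⟩
            rw [PySem.Dict.get?_insert, if_neg ?_]
            · exact hown'
            · intro hkeq
              rw [hkeq, hownb] at hown'
              cases hown'
        · intro p b a' h
          rw [PySem.Dict.get?_insert] at h
          split at h
          · rename_i hkeq
            cases h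
            obtain ⟨rfl, rfl⟩ := Prod.mk.injEq .. ▸ hkeq
            refine ⟨by rw [PySem.Dict.get?_insert, if_pos rfl], ?_⟩
            refine Or.inr ⟨r2, hge2', rfl, hmem' _ hcm, fun j hj1 hj2 => ?_⟩
            rcases lt_or_ge j (nk.getD base 2) with hlt | hge
            · exact hmem' _ (hh.2 j hj1 hlt)
            · exact hmem' _ (hmid2 j hge hj2)
          · obtain ⟨hu, hrest⟩ := I5 p b a' h
            refine ⟨?_, ?_⟩
            · rw [PySem.Dict.get?_insert]
              split
              · rename_i hcond
                subst hcond
                exact absurd ((pvMem_keys_iff used _).2 ⟨p, hu⟩) hfree2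
              · exact hu
            · rcases hrest with h' | ⟨k, hk2, heqa, hbm, hmids⟩
              · exact Or.inl h'
              · exact Or.inr ⟨k, hk2, heqa, hmem' _ hbm,
                  fun j hj1 hj2 => hmem' _ (hmids j hj1 hj2)⟩
      · -- base free: both sides take it as-is
        have hgnone : used.get? base = none := by
          cases hg : used.get? base with
          | none => rfl
          | some o => exact absurd ((pvMem_keys_iff used _).2 ⟨o, hg⟩) hcm
        have hAeq : pvScanA used pid base (used.items.length + 1) base 2 = base := by
          simp [pvScanA, hgnone]
        have hcB : ¬ PySem.Set.contains used.keys base = true := by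
          rw [PySem.Set.contains_eq_decide]
          simpa using hcm
        have havc : used.contains base = false := by
          rw [PySem.Dict.contains_eq_decide_mem_keys]
          simpa using hcm
        have hkeys' : (used.insert base pid).keys = used.keys ++ [base] :=
          PySem.Dict.keys_insert_of_not_contains used pid havc
        have hadd : PySem.Set.add used.keys base = used.keys ++ [base] :=
          PySem.Set.add_of_not_mem hcm
        have hmem' : ∀ x, x ∈ used.keys → x ∈ (used.insert base pid).keys := by
          intro x hx
          rw [hkeys']
          exact List.mem_append_left _ hx
        have hAstep : pvLoopA raw ((i, pid) :: rest) out used =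
            pvLoopA raw rest (out.insert pid base) (used.insert base pid) := by
          simp only [pvLoopA, ← hb0, ← hbase, hAeq]
        have hBstep : pvLoopB raw ((i, pid) :: rest) out used.keys nk own =
            pvLoopB raw rest (out.insert pid base) (PySem.Set.add used.keys base) nk
              (own.insert (pid, base) base) := by
          simp only [pvLoopB, ← hb0, ← hbase, hownb, if_neg hcB]
        rw [hAstep, hBstep, hadd, ← hkeys']
        refine ih _ _ _ _ Hpw' Hge' ?_ ?_ ?_ ?_
        · rw [hkeys']
          refine List.Nodup.append Hkeys (List.nodup_singleton _) ?_
          intro x hx hb'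
          simp only [List.mem_singleton] at hb'
          subst hb'
          exact hcm hx
        · intro b m h
          obtain ⟨hm2, hcov⟩ := Hnk b m h
          exact ⟨hm2, fun j h1 h2 => hmem' _ (hcov j h1 h2)⟩
        · intro a' p h
          rw [PySem.Dict.get?_insert] at h
          split at h
          · rename_i hcond
            cases h
            subst hcond
            exact ⟨base, PySem.Dict.get?_insert_self own _ _, Or.inl rfl, hshape⟩
          · rename_i hcond
            obtain ⟨b', hown', hf, hsh⟩ := I4 a' p h
            refine ⟨b', ?_, hf, hshape_weak p b' hsh⟩
            rw [PySem.Dict.get?_insert, if_neg ?_]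
            · exact hown'
            · intro hkeq
              rw [hkeq, hownb] at hown'
              cases hown'
        · intro p b a' h
          rw [PySem.Dict.get?_insert] at h
          split at h
          · rename_i hkeq
            cases h
            obtain ⟨rfl, rfl⟩ := Prod.mk.injEq .. ▸ hkeq
            exact ⟨by rw [PySem.Dict.get?_insert, if_pos rfl], Or.inl rfl⟩
          · obtain ⟨hu, hrest⟩ := I5 p b a' h
            refine ⟨?_, ?_⟩
            · rw [PySem.Dict.get?_insert]
              split
              · rename_i hcond
                subst hcond
                rw [hgnone] at hu
                cases hu
              · exact hu
            · rcases hrest with h' | ⟨k, hk2, heqa, hbm, hmids⟩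
              · exact Or.inl h'
              · exact Or.inr ⟨k, hk2, heqa, hmem' _ hbm,
                  fun j hj1 hj2 => hmem' _ (hmids j hj1 hj2)⟩

theorem pvEnum_ge : ∀ (xs : List String) (s : Int),
    ∀ pr ∈ PySem.List.enumerate xs s, s ≤ pr.1 := by
  intro xs
  induction xs with
  | nil => intro s pr h; simp [PySem.List.enumerate_nil] at h
  | cons x xs ih =>
    intro s pr h
    rw [PySem.List.enumerate_cons] at h
    rcases List.mem_cons.1 h with rfl | h
    · exact le_refl _
    · have := ih (s + 1) pr h
      omega

theorem pvEnum_pairwise : ∀ (xs : List String) (s : Int),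
    (PySem.List.enumerate xs s).Pairwise (fun x y => x.1 < y.1) := by
  intro xs
  induction xs with
  | nil => intro s; simp [PySem.List.enumerate_nil]
  | cons x xs ih =>
    intro s
    rw [PySem.List.enumerate_cons]
    exact List.Pairwise.cons (fun pr h => by have := pvEnum_ge xs (s + 1) pr h; omega) (ih (s + 1))

-- ===== VERDICT (by name: the statement is the Claim_ definition above) =====
theorem make_unique_avatar_map_spec : Claim_equal_make_unique_avatar_map := by
  intro ids raw _hdom
  unfold Spec_make_unique_avatar_map make_unique_avatar_map make_unique_avatar_map_alt
  rw [pvLoop_eq (PySem.Dict.ofList raw) (PySem.List.enumerate ids 1)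
      PySem.Dict.empty PySem.Dict.empty PySem.Dict.empty PySem.Dict.empty
      (pvEnum_pairwise ids 1)
      (pvEnum_ge ids 1)
      (by rw [PySem.Dict.keys_empty]; exact List.nodup_nil)
      (by intro b m h; rw [PySem.Dict.get?_empty] at h; cases h)
      (by intro a p h; rw [PySem.Dict.get?_empty] at h; cases h)
      (by intro p b a h; rw [PySem.Dict.get?_empty] at h; cases h)]
  rw [PySem.Dict.keys_empty]
  rfl
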